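-- pv_equiv track=rewrite | github.com/Christopher-Nall12/AnotherMistake | Crypto.py | scrambleToEncrypt
-- ===== SOURCE A (Python) =====
-- def scrambleToEncrypt(plaintext):
--     evenChar = ""
--     oddChar = ""
--     charCount = 0
--     for ch in plaintext:
--         if charCount % 2 == 0:
--             evenChar = evenChar + ch
--         else:
--             oddChar = oddChar + ch
--         charCount = charCount + 1
--     cipherText = oddChar + evenChar
--     return cipherText
-- ===== SOURCE B (Python) =====
-- def scrambleToEncrypt(plaintext):
--     return plaintext[1::2] + plaintext[::2]
-- ===== Notes on version B (the rewrite author's own statement) =====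
-- stated objective: faster
-- what changed: Replaces the counter loop with its parity test and two string accumulators by a closed-form expression of two strided slices (odd-indexed chars followed by even-indexed chars).
import Mathlib
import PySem

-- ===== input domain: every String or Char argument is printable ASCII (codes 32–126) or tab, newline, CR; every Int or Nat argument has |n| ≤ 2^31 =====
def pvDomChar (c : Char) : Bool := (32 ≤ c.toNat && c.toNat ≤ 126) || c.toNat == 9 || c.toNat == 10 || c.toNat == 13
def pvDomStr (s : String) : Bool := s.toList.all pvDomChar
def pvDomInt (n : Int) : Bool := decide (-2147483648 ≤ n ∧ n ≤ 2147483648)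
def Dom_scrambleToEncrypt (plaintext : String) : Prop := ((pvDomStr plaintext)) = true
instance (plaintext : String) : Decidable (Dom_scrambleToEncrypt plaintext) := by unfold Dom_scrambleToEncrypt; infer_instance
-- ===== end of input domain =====

-- B replaces A's counter loop, parity test and two string accumulators by two strided slices
-- (plaintext[1::2] + plaintext[::2]) — a closed-form, more idiomatic expression of the same value.


-- ===== PORT A =====
-- literal transliteration: fold over the characters with the two accumulator strings
-- (as List Char, joined to a String at the end) and the running charCount
def scrambleToEncrypt (plaintext : String) : String :=
  let st := plaintext.toList.foldl
    (fun (acc : List Char × List Char × Int) ch =>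
      if PySem.Int.mod acc.2.2 2 = 0 then (acc.1 ++ [ch], acc.2.1, acc.2.2 + 1)
      else (acc.1, acc.2.1 ++ [ch], acc.2.2 + 1))
    ([], [], 0)
  String.ofList (st.2.1 ++ st.1)

-- ===== PORT B =====
-- literal transliteration of Source B: plaintext[1::2] + plaintext[::2]
def scrambleToEncrypt_alt (plaintext : String) : String :=
  (PySem.Str.slice? plaintext (some 1) none 2).getD "" ++
  (PySem.Str.slice? plaintext none none 2).getD ""

-- ===== PRECONDITION & SPEC =====
def Spec_scrambleToEncrypt (plaintext : String) (out : String) : Prop := out = scrambleToEncrypt_alt plaintext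
instance (plaintext : String) (out : String) : Decidable (Spec_scrambleToEncrypt plaintext out) := by unfold Spec_scrambleToEncrypt; infer_instance

-- ===== CLAIM (what is proved, stated in full; the proofs are below) =====
def Claim_equal_scrambleToEncrypt : Prop := ∀ (plaintext : String), Dom_scrambleToEncrypt plaintext → Spec_scrambleToEncrypt plaintext (scrambleToEncrypt plaintext)

-- ===== LEMMAS AND PROOFS =====

/-- even-indexed elements of a list -/
def pvEvens {α : Type} : List α → List α
  | [] => []
  | [a] => [a]
  | a :: _ :: t => a :: pvEvens t

/-- odd-indexed elements of a list -/
def pvOdds {α : Type} : List α → List α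
  | [] => []
  | [_] => []
  | _ :: b :: t => b :: pvOdds t

theorem pvMod2 (n : Int) : PySem.Int.mod n 2 = n % 2 := by
  simp [PySem.Int.mod, Int.fmod_eq_emod]

theorem pvFoldA (l : List Char) :
    ∀ (ev od : List Char) (n : Int), n % 2 = 0 →
    l.foldl
      (fun (acc : List Char × List Char × Int) ch =>
        if PySem.Int.mod acc.2.2 2 = 0 then (acc.1 ++ [ch], acc.2.1, acc.2.2 + 1)
        else (acc.1, acc.2.1 ++ [ch], acc.2.2 + 1))
      (ev, od, n)
    = (ev ++ pvEvens l, od ++ pvOdds l, n + l.length) := by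
  induction l using pvEvens.induct with
  | case1 => intro ev od n h; simp [pvEvens, pvOdds]
  | case2 a =>
      intro ev od n h
      simp [pvEvens, pvOdds, h]
  | case3 a b t ih =>
      intro ev od n h
      have h1 : (n + 1) % 2 ≠ 0 := by omega
      have h2 : (n + 1 + 1) % 2 = 0 := by omega
      have hA : PySem.Int.mod n 2 = 0 := by rw [pvMod2]; exact h
      have hB : ¬ PySem.Int.mod (n + 1) 2 = 0 := by rw [pvMod2]; exact h1
      simp only [List.foldl_cons]
      rw [if_pos hA]
      rw [if_neg hB]
      rw [ih (ev ++ [a]) (od ++ [b]) (n + 1 + 1) h2]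
      simp [pvEvens, pvOdds]
      omega

theorem pvStrideEvens {α : Type} (l : List α) :
    List.filterMap (fun k => l[2 * k]?) (List.range ((l.length + 1) / 2)) = pvEvens l := by
  induction l using pvEvens.induct with
  | case1 => simp [pvEvens]
  | case2 a => simp [pvEvens, List.range_succ]
  | case3 a b t ih =>
      have hlen : (((a :: b :: t).length + 1) / 2) = ((t.length + 1) / 2) + 1 := by
        simp; omega
      rw [hlen, List.range_succ_eq_map, List.filterMap_cons, List.filterMap_map]
      have hfun : ((fun k => (a :: b :: t)[2 * k]?) ∘ (· + 1)) = (fun k => t[2 * k]?) := by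
        funext k
        have : 2 * (k + 1) = (2 * k) + 1 + 1 := by omega
        simp [Function.comp, this]
      rw [hfun, ih]
      simp [pvEvens]

theorem pvStrideOdds {α : Type} (l : List α) :
    List.filterMap (fun k => l[2 * k + 1]?) (List.range (l.length / 2)) = pvOdds l := by
  induction l using pvOdds.induct with
  | case1 => simp [pvOdds]
  | case2 a => simp [pvOdds]
  | case3 a b t ih =>
      have hlen : ((a :: b :: t).length / 2) = (t.length / 2) + 1 := by
        simp; omega
      rw [hlen, List.range_succ_eq_map, List.filterMap_cons, List.filterMap_map]
      have hfun : ((fun k => (a :: b :: t)[2 * k + 1]?) ∘ (· + 1)) = (fun k => t[2 * k + 1]?) := by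
        funext k
        have : 2 * (k + 1) + 1 = (2 * k + 1) + 1 + 1 := by omega
        simp [Function.comp, this]
      rw [hfun, ih]
      simp [pvOdds]

theorem pvSliceEven {α : Type} (l : List α) :
    PySem.List.slice? l none none 2 = some (pvEvens l) := by
  rw [← pvStrideEvens]
  simp only [PySem.List.slice?, PySem.List.sliceIndices]
  norm_num
  have hc : (if 0 < l.length then (((l.length : Int) + 2 - 1) / 2).toNat else 0) = (l.length + 1) / 2 := by
    split_ifs <;> omega
  rw [hc]
  apply List.filterMap_congr
  intro k _
  congr 1

theorem pvSliceOdd {α : Type} (l : List α) :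
    PySem.List.slice? l (some 1) none 2 = some (pvOdds l) := by
  rw [← pvStrideOdds]
  simp only [PySem.List.slice?, PySem.List.sliceIndices]
  norm_num
  cases l with
  | nil => simp
  | cons a t =>
      have hm : min 1 ((a :: t).length : Int) = 1 := by simp
      rw [hm]
      have hc : (if 1 < (a :: t).length then ((((a :: t).length : Int) - 1 + 2 - 1) / 2).toNat else 0)
          = (a :: t).length / 2 := by
        split_ifs <;> omega
      rw [hc]
      apply List.filterMap_congr
      intro k _
      congr 1
      omega

-- ===== VERDICT (by name: the statement is the Claim_ definition above) =====
theorem scrambleToEncrypt_spec : Claim_equal_scrambleToEncrypt := by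
  intro p _
  unfold Spec_scrambleToEncrypt scrambleToEncrypt scrambleToEncrypt_alt
  rw [pvFoldA p.toList [] [] 0 (by decide)]
  simp [PySem.Str.slice?, PySem.Chars.slice?_eq_listSlice?, pvSliceEven, pvSliceOdd]
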